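-- pv_equiv track=rewrite | github.com/nikdimentiy/mint | Algorithms/rock_move.py | countbeating_rooks
-- ===== SOURCE A (Python) =====
-- def countbeating_rooks(rookcoords):
--     """This function takes a list of rook coordinates on a chess board and returns the number of pairs of rooks that can beat each other.
--
--     Parameters:
--     rookcoords (list): A list of tuples representing the row and column of each rook on the board.
--
--     Returns:
--     int: The number of pairs of rooks that can beat each other.
--
--     Example:
--     >>> rookcoords = [(1, 1), (1, 3), (2, 4), (3, 1), (4, 4)]
--     >>> countbeating_rooks(rookcoords)
--     3
--     """
--
--     def addrook(roworcol, key):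
--         """This helper function adds a rook to a dictionary that counts the number of rooks in each row or column.
--
--         Parameters:
--         roworcol (dict): A dictionary that maps a row or column number to the number of rooks in that row or column.
--         key (int): The row or column number of the rook to be added.
--
--         Returns:
--         None
--         """
--         if key not in roworcol: # If the key is not in the dictionary, initialize it with zero
--             roworcol[key] = 0
--         roworcol[key] += 1 # Increment the count of rooks for that key
--
--     def countpairs(roworcol):
--         """This helper function counts the number of pairs of rooks that can beat each other in a given row or column.
--
--         Parameters:
--         roworcol (dict): A dictionary that maps a row or column number to the number of rooks in that row or column.
--
--         Returns:
--         int: The number of pairs of rooks that can beat each other in that row or column.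
--         """
--         pairs = 0 # Initialize the number of pairs to zero
--         for key in roworcol: # Loop through each key in the dictionary
--             pairs += roworcol[key] - 1 # Add the number of rooks minus one to the number of pairs
--             # This is because each rook can beat all the other rooks in the same row or column
--         return pairs # Return the number of pairs
--
--     rooksinrow = {} # Initialize an empty dictionary to store the number of rooks in each row
--     rooksincol = {} # Initialize an empty dictionary to store the number of rooks in each column
--     for row, col in rookcoords: # Loop through each coordinate in the list
--         addrook(rooksinrow, row) # Add a rook to the corresponding row
--         addrook(rooksincol, col) # Add a rook to the corresponding column
--
--     return countpairs(rooksinrow) + countpairs(rooksincol) # Return the sum of pairs in rows and columns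
-- ===== SOURCE B (Python) =====
-- def countbeating_rooks(rookcoords):
--     """Number of rook pairs sharing a row or column (adjacent-in-line pairs).
--
--     Summing (count-1) over the distinct values of a coordinate equals
--     n - (number of distinct values), so no per-key counting is needed.
--     """
--     rows = {row for row, col in rookcoords}
--     cols = {col for row, col in rookcoords}
--     return 2 * len(rookcoords) - len(rows) - len(cols)
-- ===== Notes on version B (the rewrite author's own statement) =====
-- stated objective: simpler
-- what changed: Replaces the two counting dictionaries and the summing loop by the identity sum(count-1) = n - #distinct, computing 2*n - |distinct rows| - |distinct cols| from two set comprehensions.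
import Mathlib
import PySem

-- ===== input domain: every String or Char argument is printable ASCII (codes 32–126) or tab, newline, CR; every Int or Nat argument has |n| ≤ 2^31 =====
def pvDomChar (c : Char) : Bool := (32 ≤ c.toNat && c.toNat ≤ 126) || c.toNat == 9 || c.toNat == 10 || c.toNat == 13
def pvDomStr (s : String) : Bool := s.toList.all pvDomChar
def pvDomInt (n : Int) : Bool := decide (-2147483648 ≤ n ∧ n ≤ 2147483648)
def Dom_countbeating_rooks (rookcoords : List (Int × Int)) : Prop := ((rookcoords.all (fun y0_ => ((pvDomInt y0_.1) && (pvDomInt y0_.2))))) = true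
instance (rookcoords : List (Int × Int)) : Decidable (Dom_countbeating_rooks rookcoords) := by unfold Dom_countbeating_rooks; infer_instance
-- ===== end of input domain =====

-- B computes the same count as A via the identity sum(count-1) = n - #distinct, so: 2*n - |distinct rows| - |distinct cols|.

-- ===== PORT A =====
-- helper addrook: if key not in d: d[key] = 0; d[key] += 1
def pvAddrook (d : PySem.Dict Int Int) (key : Int) : PySem.Dict Int Int :=
  let d := if d.contains key then d else d.insert key 0
  d.insert key (d.getD key 0 + 1)

-- helper countpairs: pairs = 0; for key in d: pairs += d[key] - 1; return pairs
def pvCountpairs (d : PySem.Dict Int Int) : Int :=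
  d.keys.foldl (fun pairs key => pairs + (d.getD key 0 - 1)) 0

def countbeating_rooks (rookcoords : List (Int × Int)) : Int :=
  let st := rookcoords.foldl
    (fun (st : PySem.Dict Int Int × PySem.Dict Int Int) rc =>
      (pvAddrook st.1 rc.1, pvAddrook st.2 rc.2))
    (PySem.Dict.empty, PySem.Dict.empty)
  pvCountpairs st.1 + pvCountpairs st.2

-- ===== PORT B =====
def countbeating_rooks_alt (rookcoords : List (Int × Int)) : Int :=
  let rows : PySem.Set Int := PySem.Set.ofList (rookcoords.map (fun rc => rc.1))
  let cols : PySem.Set Int := PySem.Set.ofList (rookcoords.map (fun rc => rc.2))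
  2 * (rookcoords.length : Int) - (rows.length : Int) - (cols.length : Int)

-- ===== PRECONDITION & SPEC =====
def Spec_countbeating_rooks (rookcoords : List (Int × Int)) (out : Int) : Prop := out = countbeating_rooks_alt rookcoords
instance (rookcoords : List (Int × Int)) (out : Int) : Decidable (Spec_countbeating_rooks rookcoords out) := by unfold Spec_countbeating_rooks; infer_instance

-- ===== CLAIM (what is proved, stated in full; the proofs are below) =====
def Claim_equal_countbeating_rooks : Prop := ∀ (rookcoords : List (Int × Int)), Dom_countbeating_rooks rookcoords → Spec_countbeating_rooks rookcoords (countbeating_rooks rookcoords)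

-- ===== LEMMAS AND PROOFS =====

-- addrook is exactly one counting insert
theorem pvAddrook_eq (d : PySem.Dict Int Int) (k : Int) :
    pvAddrook d k = d.insert k (d.getD k 0 + 1) := by
  unfold pvAddrook
  by_cases h : d.contains k = true
  · simp [h]
  · simp only [Bool.not_eq_true] at h
    have h0 : d.getD k 0 = 0 := by
      simp [PySem.Dict.getD_of_not_contains, h]
    simp [h, PySem.Dict.getD_insert_self, PySem.Dict.insert_insert_self, h0]

-- the paired fold splits into two independent folds
theorem pvFold_pair (l : List (Int × Int)) (d1 d2 : PySem.Dict Int Int) :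
    l.foldl (fun (st : PySem.Dict Int Int × PySem.Dict Int Int) rc =>
        (pvAddrook st.1 rc.1, pvAddrook st.2 rc.2)) (d1, d2)
      = ((l.map (fun rc => rc.1)).foldl pvAddrook d1,
         (l.map (fun rc => rc.2)).foldl pvAddrook d2) := by
  induction l generalizing d1 d2 with
  | nil => rfl
  | cons x xs ih => simp [List.foldl_cons, ih]

theorem pvFold_eq_counter (l : List Int) :
    l.foldl pvAddrook PySem.Dict.empty = PySem.Dict.counter l := by
  have h : pvAddrook = fun (d : PySem.Dict Int Int) x => d.insert x (d.getD x 0 + 1) := by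
    funext d k; exact pvAddrook_eq d k
  rw [h, PySem.Dict.foldl_insert_getD_add_one_eq_counter]

-- running sum as a map-sum
theorem pvFoldl_add (f : Int → Int) (s : List Int) (a : Int) :
    s.foldl (fun p k => p + f k) a = a + (s.map f).sum := by
  induction s generalizing a with
  | nil => simp
  | cons x xs ih => simp [List.foldl_cons, ih, add_assoc]

-- sum of the 'k = x' indicator over a nodup list containing x is 1
theorem pvSum_indicator (s : List Int) (x : Int) (hnd : s.Nodup) (hx : x ∈ s) :
    (s.map (fun k => if k = x then (1 : Int) else 0)).sum = 1 := by
  induction s with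
  | nil => cases hx
  | cons y ys ih =>
    rcases List.nodup_cons.mp hnd with ⟨hy, hnd'⟩
    by_cases hxy : y = x
    · subst hxy
      have hz : (ys.map (fun k => if k = y then (1 : Int) else 0)).sum = 0 := by
        apply List.sum_eq_zero
        intro z hz
        rcases List.mem_map.mp hz with ⟨k, hk, rfl⟩
        have hky : k ≠ y := fun h => hy (h ▸ hk)
        simp [hky]
      simp [hz]
    · have hx' : x ∈ ys := by
        rcases List.mem_cons.mp hx with h | h
        · exact absurd h.symm hxy
        · exact h
      simp [hxy, ih hnd' hx']

-- summing multiplicities over a nodup superset of the members gives the length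
theorem pvSum_count (l s : List Int) (hnd : s.Nodup) (hsub : ∀ k ∈ l, k ∈ s) :
    (s.map (fun k => (l.count k : Int))).sum = l.length := by
  induction l with
  | nil => simp
  | cons x xs ih =>
    have hx : x ∈ s := hsub x (List.mem_cons_self ..)
    have hsub' : ∀ k ∈ xs, k ∈ s := fun k hk => hsub k (List.mem_cons_of_mem _ hk)
    have hsplit : (s.map (fun k => ((x :: xs).count k : Int))).sum
        = (s.map (fun k => (xs.count k : Int))).sum
          + (s.map (fun k => if k = x then (1 : Int) else 0)).sum := by
      rw [← List.sum_map_add]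
      apply congrArg
      apply List.map_congr_left
      intro k _
      by_cases h : k = x
      · subst h
        rw [List.count_cons_self]
        push_cast
        simp
      · have h' : ¬x = k := fun hh => h hh.symm
        simp [h, h']
    rw [hsplit, ih hsub', pvSum_indicator s x hnd hx]
    simp [List.length_cons]

-- countpairs of a counter is length minus number of distinct values
theorem pvCountpairs_counter (l : List Int) :
    pvCountpairs (PySem.Dict.counter l) = (l.length : Int) - ((PySem.Set.ofList l).length : Int) := by
  unfold pvCountpairs
  rw [pvFoldl_add]
  have hkeys : (PySem.Dict.counter l).keys = PySem.Set.ofList l := PySem.Dict.keys_counter l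
  have hmap : ((PySem.Dict.counter l).keys.map
      (fun key => (PySem.Dict.counter l).getD key 0 - 1))
      = (PySem.Set.ofList l).map (fun k => (l.count k : Int) - 1) := by
    rw [hkeys]
    apply List.map_congr_left
    intro k _
    rw [PySem.Dict.getD_counter]
  rw [hmap]
  have hsplit : ((PySem.Set.ofList l).map (fun k => (l.count k : Int) - 1)).sum
      = ((PySem.Set.ofList l).map (fun k => (l.count k : Int))).sum
        - ((PySem.Set.ofList l).length : Int) := by
    induction (PySem.Set.ofList l) with
    | nil => simp
    | cons y ys ih => simp [ih]; ring
  rw [hsplit, pvSum_count l (PySem.Set.ofList l) (PySem.Set.nodup_ofList l)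
    (fun k hk => (PySem.Set.mem_ofList ..).mpr hk)]
  ring

-- ===== VERDICT (by name: the statement is the Claim_ definition above) =====
theorem countbeating_rooks_spec : Claim_equal_countbeating_rooks := by
  intro rookcoords _
  simp only [Spec_countbeating_rooks, countbeating_rooks, countbeating_rooks_alt]
  rw [pvFold_pair, pvFold_eq_counter, pvFold_eq_counter,
    pvCountpairs_counter, pvCountpairs_counter]
  simp [List.length_map]
  ring
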